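-- pv_equiv track=rewrite | github.com/ecwu/bcsc | extract.py | get_course_desc
-- ===== SOURCE A (Python) =====
-- from typing import Dict, List, Optional, Tuple
--
-- def get_course_desc(course_raw: List[str]) -> List[str]:
--     """Extract course description from raw course data."""
--     buffer = []
--     found_description = False
--     description_markers = ["Course Description:", "Course  Description", "Description:", "Course Description"]
--
--     for line in course_raw:
--         if any(marker in line for marker in description_markers):
--             found_description = True
--         if found_description:
--             buffer.append(line)
--     return buffer
-- ===== SOURCE B (Python) =====
-- def get_course_desc(course_raw):
--     """Extract course description from raw course data."""
--     description_markers = ["Course Description:", "Course  Description", "Description:", "Course Description"]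
--     idx = next((i for i, line in enumerate(course_raw)
--                 if any(marker in line for marker in description_markers)), None)
--     return [] if idx is None else course_raw[idx:]
-- ===== Notes on version B (the rewrite author's own statement) =====
-- stated objective: simpler
-- what changed: Replaces the flag-accumulating loop with locate-then-slice: find the index of the first marker line (stopping at the first match) and return the tail slice, or an empty list if no marker occurs.
import Mathlib
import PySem

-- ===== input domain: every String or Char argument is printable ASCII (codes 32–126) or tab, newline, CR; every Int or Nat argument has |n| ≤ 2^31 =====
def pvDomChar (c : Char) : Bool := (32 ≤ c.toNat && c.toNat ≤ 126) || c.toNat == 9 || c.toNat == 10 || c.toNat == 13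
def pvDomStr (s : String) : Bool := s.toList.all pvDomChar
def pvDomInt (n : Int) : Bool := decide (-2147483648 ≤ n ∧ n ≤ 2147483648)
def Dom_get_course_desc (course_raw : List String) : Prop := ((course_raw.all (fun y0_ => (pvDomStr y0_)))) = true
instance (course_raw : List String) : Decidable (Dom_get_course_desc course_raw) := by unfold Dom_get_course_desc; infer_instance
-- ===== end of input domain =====

-- B replaces A's flag-accumulating loop by locate-then-slice (first marker index, then the tail); same result, simpler decomposition.


-- ===== PORT A =====
-- the shared constant description_markers
def descMarkers : List String := ["Course Description:", "Course  Description", "Description:", "Course Description"]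

-- 'any(marker in line for marker in description_markers)'
def hasMarker (line : String) : Bool := descMarkers.any (fun m => PySem.Str.isIn m line)

-- literal port of A's loop: state = (buffer, found_description)
def get_course_desc (course_raw : List String) : List String :=
  (course_raw.foldl
    (fun (st : List String × Bool) line =>
      let found := if hasMarker line then true else st.2
      (if found then st.1 ++ [line] else st.1, found))
    ([], false)).1

-- ===== PORT B =====
-- locate the first marker line (next(... enumerate ...) = findIdx?), then slice the tail
def get_course_desc_alt (course_raw : List String) : List String :=
  match course_raw.findIdx? hasMarker with
  | none => []
  | some i => course_raw.drop i

-- ===== PRECONDITION & SPEC =====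
def Spec_get_course_desc (course_raw : List String) (out : List String) : Prop := out = get_course_desc_alt course_raw
instance (course_raw : List String) (out : List String) : Decidable (Spec_get_course_desc course_raw out) := by unfold Spec_get_course_desc; infer_instance

-- ===== CLAIM (what is proved, stated in full; the proofs are below) =====
def Claim_equal_get_course_desc : Prop := ∀ (course_raw : List String), Dom_get_course_desc course_raw → Spec_get_course_desc course_raw (get_course_desc course_raw)

-- ===== LEMMAS AND PROOFS =====

-- once found_description is true, A's loop appends every remaining line
theorem loop_found (l : List String) (acc : List String) :
    (l.foldl
      (fun (st : List String × Bool) line =>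
        let found := if hasMarker line then true else st.2
        (if found then st.1 ++ [line] else st.1, found))
      (acc, true)).1 = acc ++ l := by
  induction l generalizing acc with
  | nil => simp
  | cons x t ih =>
    rw [List.foldl_cons]
    rw [show (let found := if hasMarker x = true then true else (((acc, true)) : List String × Bool).2;
        (if found = true then ((acc, true)).1 ++ [x] else ((acc, true)).1, found)) = (acc ++ [x], true) from by simp]
    rw [ih]; simp

-- while found_description is false, A's loop computes B's locate-then-slice result
theorem loop_not_found (l : List String) (acc : List String) :
    (l.foldl
      (fun (st : List String × Bool) line =>
        let found := if hasMarker line then true else st.2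
        (if found then st.1 ++ [line] else st.1, found))
      (acc, false)).1 = acc ++ get_course_desc_alt l := by
  induction l generalizing acc with
  | nil => simp [get_course_desc_alt]
  | cons x t ih =>
    by_cases h : hasMarker x
    · rw [List.foldl_cons]
      rw [show (let found := if hasMarker x = true then true else ((acc, false) : List String × Bool).2;
          (if found = true then ((acc, false) : List String × Bool).1 ++ [x] else ((acc, false) : List String × Bool).1, found)) = ((acc ++ [x], true) : List String × Bool) from by simp [h]]
      rw [loop_found]
      simp [get_course_desc_alt, List.findIdx?_cons, h]
    · rw [List.foldl_cons]
      rw [show (let found := if hasMarker x = true then true else ((acc, false) : List String × Bool).2;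
          (if found = true then ((acc, false) : List String × Bool).1 ++ [x] else ((acc, false) : List String × Bool).1, found)) = ((acc, false) : List String × Bool) from by simp [h]]
      rw [ih]
      simp only [get_course_desc_alt, List.findIdx?_cons, h]
      cases ht : t.findIdx? hasMarker <;> simp

-- ===== VERDICT (by name: the statement is the Claim_ definition above) =====
theorem get_course_desc_spec : Claim_equal_get_course_desc := by
  intro course_raw _
  unfold Spec_get_course_desc get_course_desc
  simpa using loop_not_found course_raw []
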